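-- pv_equiv track=rewrite | github.com/klapperking/aoc2025 | day09/solution.py | is_rectangle_valid
-- ===== SOURCE A (Python) =====
-- def is_rectangle_valid(
--     pos1: tuple[int, int],
--     pos2: tuple[int, int],
--     valid_tiles: set[tuple[int, int]],
-- ) -> bool:
--     x1, x2 = sorted((pos1[0], pos2[0]))
--     y1, y2 = sorted((pos1[1], pos2[1]))
--
--     # Check top and bottom edges
--     for x in range(x1, x2 + 1):
--         if (x, y1) not in valid_tiles or (x, y2) not in valid_tiles:
--             return False
--
--     # Check left and right edges
--     for y in range(y1, y2 + 1):
--         if (x1, y) not in valid_tiles or (x2, y) not in valid_tiles: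
--             return False
--
--     return True
-- ===== SOURCE B (Python) =====
-- def is_rectangle_valid(
--     pos1: tuple[int, int],
--     pos2: tuple[int, int],
--     valid_tiles: set[tuple[int, int]],
-- ) -> bool:
--     x1, x2 = sorted((pos1[0], pos2[0]))
--     y1, y2 = sorted((pos1[1], pos2[1]))
--
--     # closed-form number of distinct perimeter tiles
--     if x1 == x2 or y1 == y2:
--         perim_size = (x2 - x1 + 1) * (y2 - y1 + 1)
--     else:
--         perim_size = 2 * (x2 - x1) + 2 * (y2 - y1)
--
--     # count the valid tiles that lie on the perimeter (valid_tiles is a set,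
--     # so each perimeter tile is counted at most once)
--     on_perim = sum(
--         1
--         for (x, y) in valid_tiles
--         if x1 <= x <= x2
--         and y1 <= y <= y2
--         and (x == x1 or x == x2 or y == y1 or y == y2)
--     )
--     return on_perim == perim_size
-- ===== Notes on version B (the rewrite author's own statement) =====
-- stated objective: alternative
-- what changed: Instead of walking every perimeter tile and testing membership with early returns, B never iterates the perimeter: it counts in one pass the valid tiles lying on the perimeter and compares that count with the closed-form perimeter size; Pre_ only requires the valid_tiles list to be duplicate-free, which every Python set argument is under the type convention.
import Mathlib
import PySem

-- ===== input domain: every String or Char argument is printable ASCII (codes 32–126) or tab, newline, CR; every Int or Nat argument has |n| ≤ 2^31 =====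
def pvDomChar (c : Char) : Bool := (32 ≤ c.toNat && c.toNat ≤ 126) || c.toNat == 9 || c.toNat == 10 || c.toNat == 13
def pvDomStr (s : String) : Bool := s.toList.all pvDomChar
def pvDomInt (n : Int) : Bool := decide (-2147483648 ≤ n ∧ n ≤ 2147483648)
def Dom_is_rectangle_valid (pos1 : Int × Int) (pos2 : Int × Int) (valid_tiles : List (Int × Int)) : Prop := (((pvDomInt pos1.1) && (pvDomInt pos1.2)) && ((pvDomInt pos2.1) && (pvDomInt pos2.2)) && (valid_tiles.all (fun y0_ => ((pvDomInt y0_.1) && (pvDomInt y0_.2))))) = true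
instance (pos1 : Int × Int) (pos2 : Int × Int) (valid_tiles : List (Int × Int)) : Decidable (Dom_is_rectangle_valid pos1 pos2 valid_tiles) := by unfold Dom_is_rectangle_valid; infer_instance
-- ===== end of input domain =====

-- B never walks the perimeter: it counts the valid tiles lying on the perimeter in one pass
-- and compares with the perimeter's closed-form size (objective: alternative).

-- ===== PORT A =====
-- 'for x in range(x1, x2 + 1): if … : return False' — a short-circuiting loop over x
def pvEdgeXLoop (valid_tiles : List (Int × Int)) (y1 y2 x2 : Int) (x : Int) : Bool :=
  if x < x2 + 1 then
    if valid_tiles.contains (x, y1) && valid_tiles.contains (x, y2) then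
      pvEdgeXLoop valid_tiles y1 y2 x2 (x + 1)
    else false
  else true
termination_by (x2 + 1 - x).toNat
decreasing_by omega

-- 'for y in range(y1, y2 + 1): if … : return False' — a short-circuiting loop over y
def pvEdgeYLoop (valid_tiles : List (Int × Int)) (x1 x2 y2 : Int) (y : Int) : Bool :=
  if y < y2 + 1 then
    if valid_tiles.contains (x1, y) && valid_tiles.contains (x2, y) then
      pvEdgeYLoop valid_tiles x1 x2 y2 (y + 1)
    else false
  else true
termination_by (y2 + 1 - y).toNat
decreasing_by omega

def is_rectangle_valid (pos1 : Int × Int) (pos2 : Int × Int) (valid_tiles : List (Int × Int)) : Bool :=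
  let x1 := min pos1.1 pos2.1
  let x2 := max pos1.1 pos2.1
  let y1 := min pos1.2 pos2.2
  let y2 := max pos1.2 pos2.2
  if pvEdgeXLoop valid_tiles y1 y2 x2 x1 then
    pvEdgeYLoop valid_tiles x1 x2 y2 y1
  else
    false

-- ===== PORT B =====
def is_rectangle_valid_alt (pos1 : Int × Int) (pos2 : Int × Int) (valid_tiles : List (Int × Int)) : Bool :=
  let x1 := min pos1.1 pos2.1
  let x2 := max pos1.1 pos2.1
  let y1 := min pos1.2 pos2.2
  let y2 := max pos1.2 pos2.2
  let perimSize : Int :=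
    if x1 = x2 ∨ y1 = y2 then (x2 - x1 + 1) * (y2 - y1 + 1)
    else 2 * (x2 - x1) + 2 * (y2 - y1)
  let onPerim : Int :=
    (valid_tiles.countP (fun t =>
      decide (x1 ≤ t.1 ∧ t.1 ≤ x2 ∧ y1 ≤ t.2 ∧ t.2 ≤ y2 ∧
        (t.1 = x1 ∨ t.1 = x2 ∨ t.2 = y1 ∨ t.2 = y2))) : Int)
  onPerim == perimSize

-- ===== PRECONDITION & SPEC =====
-- valid_tiles encodes a Python set (type convention: a list of DISTINCT elements); Pre_ excludes
-- duplicate-carrying lists, which represent no Python input and on which B's count-based test is accidental.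
def Pre_is_rectangle_valid (pos1 : Int × Int) (pos2 : Int × Int) (valid_tiles : List (Int × Int)) : Prop :=
  valid_tiles.Nodup
instance (pos1 : Int × Int) (pos2 : Int × Int) (valid_tiles : List (Int × Int)) : Decidable (Pre_is_rectangle_valid pos1 pos2 valid_tiles) := by unfold Pre_is_rectangle_valid; infer_instance
def pvWitness_is_rectangle_valid : (Int × Int) × (Int × Int) × (List (Int × Int)) :=
  ((0, 0), (1, 1), [(0, 0), (0, 1), (1, 0), (1, 1)])
def Spec_is_rectangle_valid (pos1 : Int × Int) (pos2 : Int × Int) (valid_tiles : List (Int × Int)) (out : Bool) : Prop := out = is_rectangle_valid_alt pos1 pos2 valid_tiles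
instance (pos1 : Int × Int) (pos2 : Int × Int) (valid_tiles : List (Int × Int)) (out : Bool) : Decidable (Spec_is_rectangle_valid pos1 pos2 valid_tiles out) := by unfold Spec_is_rectangle_valid; infer_instance

-- ===== CLAIM (what is proved, stated in full; the proofs are below) =====
def Claim_equal_is_rectangle_valid : Prop := ∀ (pos1 : Int × Int) (pos2 : Int × Int) (valid_tiles : List (Int × Int)), Dom_is_rectangle_valid pos1 pos2 valid_tiles → Pre_is_rectangle_valid pos1 pos2 valid_tiles → Spec_is_rectangle_valid pos1 pos2 valid_tiles (is_rectangle_valid pos1 pos2 valid_tiles)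

-- ===== LEMMAS AND PROOFS =====

-- the perimeter as a finite set (proof-only helper)
noncomputable def pvPerim (x1 x2 y1 y2 : Int) : Finset (Int × Int) :=
  (Finset.Icc x1 x2 ×ˢ ({y1, y2} : Finset Int)) ∪ (({x1, x2} : Finset Int) ×ˢ Finset.Icc y1 y2)

theorem mem_pvPerim (x1 x2 y1 y2 : Int) (hx : x1 ≤ x2) (hy : y1 ≤ y2) (t : Int × Int) :
    t ∈ pvPerim x1 x2 y1 y2 ↔
      (x1 ≤ t.1 ∧ t.1 ≤ x2 ∧ y1 ≤ t.2 ∧ t.2 ≤ y2 ∧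
        (t.1 = x1 ∨ t.1 = x2 ∨ t.2 = y1 ∨ t.2 = y2)) := by
  simp only [pvPerim, Finset.mem_union, Finset.mem_product, Finset.mem_Icc,
    Finset.mem_insert, Finset.mem_singleton]
  omega

theorem card_pvPerim (x1 x2 y1 y2 : Int) (hx : x1 ≤ x2) (hy : y1 ≤ y2) :
    ((pvPerim x1 x2 y1 y2).card : Int) =
      if x1 = x2 ∨ y1 = y2 then (x2 - x1 + 1) * (y2 - y1 + 1)
      else 2 * (x2 - x1) + 2 * (y2 - y1) := by
  have hdecomp : pvPerim x1 x2 y1 y2 =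
      (Finset.Icc x1 x2 ×ˢ ({y1, y2} : Finset Int)) ∪
        (({x1, x2} : Finset Int) ×ˢ Finset.Icc (y1 + 1) (y2 - 1)) := by
    apply Finset.ext
    intro t
    simp only [Finset.mem_union, Finset.mem_product, Finset.mem_Icc,
      Finset.mem_insert, Finset.mem_singleton, pvPerim]
    omega
  have hdisj : Disjoint (Finset.Icc x1 x2 ×ˢ ({y1, y2} : Finset Int))
      (({x1, x2} : Finset Int) ×ˢ Finset.Icc (y1 + 1) (y2 - 1)) := by
    rw [Finset.disjoint_left]
    intro t ht ht'
    simp only [Finset.mem_product, Finset.mem_Icc, Finset.mem_insert,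
      Finset.mem_singleton] at ht ht'
    omega
  have hcy : ({y1, y2} : Finset Int).card = if y1 = y2 then 1 else 2 := by
    split
    · next h => subst h; simp
    · next h => exact Finset.card_pair h
  have hcx : ({x1, x2} : Finset Int).card = if x1 = x2 then 1 else 2 := by
    split
    · next h => subst h; simp
    · next h => exact Finset.card_pair h
  rw [hdecomp, Finset.card_union_of_disjoint hdisj, Finset.card_product,
    Finset.card_product, hcy, hcx, Int.card_Icc, Int.card_Icc]
  by_cases hxx : x1 = x2 <;> by_cases hyy : y1 = y2
  · rw [if_pos hxx, if_pos hyy, if_pos (Or.inl hxx),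
      show x2 - x1 + 1 = 1 from by omega, show y2 - y1 + 1 = 1 from by omega]
    push_cast
    omega
  · rw [if_pos hxx, if_neg hyy, if_pos (Or.inl hxx),
      show x2 - x1 + 1 = 1 from by omega, one_mul]
    push_cast
    omega
  · rw [if_neg hxx, if_pos hyy, if_pos (Or.inr hyy),
      show y2 - y1 + 1 = 1 from by omega, mul_one]
    push_cast
    omega
  · rw [if_neg hxx, if_neg hyy, if_neg (show ¬ (x1 = x2 ∨ y1 = y2) from by tauto)]
    push_cast
    omega

-- B's count equals the number of perimeter tiles present in valid_tiles
theorem countP_eq_card (x1 x2 y1 y2 : Int) (hx : x1 ≤ x2) (hy : y1 ≤ y2)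
    (vt : List (Int × Int)) (hnd : vt.Nodup) :
    vt.countP (fun t =>
        decide (x1 ≤ t.1 ∧ t.1 ≤ x2 ∧ y1 ≤ t.2 ∧ t.2 ≤ y2 ∧
          (t.1 = x1 ∨ t.1 = x2 ∨ t.2 = y1 ∨ t.2 = y2))) =
      (vt.toFinset ∩ pvPerim x1 x2 y1 y2).card := by
  rw [List.countP_eq_length_filter, ← List.toFinset_card_of_nodup (hnd.filter _),
    List.toFinset_filter]
  congr 1
  apply Finset.ext
  intro t
  simp only [Finset.mem_filter, Finset.mem_inter, List.mem_toFinset,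
    decide_eq_true_eq, mem_pvPerim x1 x2 y1 y2 hx hy t]

-- the x-edge loop checks every x in [x, x2]
theorem pvEdgeXLoop_iff (vt : List (Int × Int)) (y1 y2 x2 x : Int) :
    pvEdgeXLoop vt y1 y2 x2 x = true ↔
      ∀ z, x ≤ z → z ≤ x2 → ((z, y1) ∈ vt ∧ (z, y2) ∈ vt) := by
  fun_induction pvEdgeXLoop vt y1 y2 x2 x with
  | case1 x hlt hmem ih =>
    rw [ih]
    simp only [Bool.and_eq_true, List.contains_iff_mem] at hmem
    constructor
    · intro h z hz1 hz2
      rcases eq_or_lt_of_le hz1 with rfl | hz1'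
      · exact hmem
      · exact h z (by omega) hz2
    · intro h z hz1 hz2
      exact h z (by omega) hz2
  | case2 x hlt hmem =>
    simp only [Bool.and_eq_true, List.contains_iff_mem, not_and_or] at hmem
    simp only [Bool.false_eq_true, false_iff, not_forall]
    exact ⟨x, le_refl x, by omega, by tauto⟩
  | case3 x hlt =>
    simp only [true_iff]
    intro z hz1 hz2
    omega

-- the y-edge loop checks every y in [y, y2]
theorem pvEdgeYLoop_iff (vt : List (Int × Int)) (x1 x2 y2 y : Int) :
    pvEdgeYLoop vt x1 x2 y2 y = true ↔
      ∀ z, y ≤ z → z ≤ y2 → ((x1, z) ∈ vt ∧ (x2, z) ∈ vt) := by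
  fun_induction pvEdgeYLoop vt x1 x2 y2 y with
  | case1 y hlt hmem ih =>
    rw [ih]
    simp only [Bool.and_eq_true, List.contains_iff_mem] at hmem
    constructor
    · intro h z hz1 hz2
      rcases eq_or_lt_of_le hz1 with rfl | hz1'
      · exact hmem
      · exact h z (by omega) hz2
    · intro h z hz1 hz2
      exact h z (by omega) hz2
  | case2 y hlt hmem =>
    simp only [Bool.and_eq_true, List.contains_iff_mem, not_and_or] at hmem
    simp only [Bool.false_eq_true, false_iff, not_forall]
    exact ⟨y, le_refl y, by omega, by tauto⟩
  | case3 y hlt =>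
    simp only [true_iff]
    intro z hz1 hz2
    omega

-- A returns true iff every perimeter tile is in valid_tiles
theorem portA_iff_subset (x1 x2 y1 y2 : Int) (hx : x1 ≤ x2) (hy : y1 ≤ y2)
    (vt : List (Int × Int)) :
    ((if pvEdgeXLoop vt y1 y2 x2 x1 then pvEdgeYLoop vt x1 x2 y2 y1 else false) = true) ↔
      pvPerim x1 x2 y1 y2 ⊆ vt.toFinset := by
  have hif : (if pvEdgeXLoop vt y1 y2 x2 x1 then pvEdgeYLoop vt x1 x2 y2 y1 else false) =
      (pvEdgeXLoop vt y1 y2 x2 x1 && pvEdgeYLoop vt x1 x2 y2 y1) := by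
    cases pvEdgeXLoop vt y1 y2 x2 x1 <;> simp
  rw [hif, Bool.and_eq_true, pvEdgeXLoop_iff, pvEdgeYLoop_iff]
  constructor
  · rintro ⟨h1, h2⟩ t ht
    rw [mem_pvPerim x1 x2 y1 y2 hx hy] at ht
    obtain ⟨ha, hb, hc, hd, he⟩ := ht
    rw [List.mem_toFinset]
    rcases he with he | he | he | he
    · have := h2 t.2 hc hd; rw [← he] at this; simpa using this.1
    · have := h2 t.2 hc hd; rw [← he] at this; simpa using this.2
    · have := h1 t.1 ha hb; rw [← he] at this; simpa using this.1
    · have := h1 t.1 ha hb; rw [← he] at this; simpa using this.2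
  · intro h
    constructor
    · intro z hz1 hz2
      constructor
      · rw [← List.mem_toFinset]
        exact h (by rw [mem_pvPerim x1 x2 y1 y2 hx hy]; simp; omega)
      · rw [← List.mem_toFinset]
        exact h (by rw [mem_pvPerim x1 x2 y1 y2 hx hy]; simp; omega)
    · intro z hz1 hz2
      constructor
      · rw [← List.mem_toFinset]
        exact h (by rw [mem_pvPerim x1 x2 y1 y2 hx hy]; simp; omega)
      · rw [← List.mem_toFinset]
        exact h (by rw [mem_pvPerim x1 x2 y1 y2 hx hy]; simp; omega)

-- B returns true iff every perimeter tile is in valid_tiles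
theorem portB_iff_subset (x1 x2 y1 y2 : Int) (hx : x1 ≤ x2) (hy : y1 ≤ y2)
    (vt : List (Int × Int)) (hnd : vt.Nodup) :
    (((vt.countP (fun t =>
        decide (x1 ≤ t.1 ∧ t.1 ≤ x2 ∧ y1 ≤ t.2 ∧ t.2 ≤ y2 ∧
          (t.1 = x1 ∨ t.1 = x2 ∨ t.2 = y1 ∨ t.2 = y2))) : Int) ==
      (if x1 = x2 ∨ y1 = y2 then (x2 - x1 + 1) * (y2 - y1 + 1)
       else 2 * (x2 - x1) + 2 * (y2 - y1))) = true) ↔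
      pvPerim x1 x2 y1 y2 ⊆ vt.toFinset := by
  rw [beq_iff_eq, ← card_pvPerim x1 x2 y1 y2 hx hy,
    countP_eq_card x1 x2 y1 y2 hx hy vt hnd]
  rw [Int.natCast_inj]
  constructor
  · intro h
    have hsub : vt.toFinset ∩ pvPerim x1 x2 y1 y2 ⊆ pvPerim x1 x2 y1 y2 :=
      Finset.inter_subset_right
    have := Finset.eq_of_subset_of_card_le hsub (le_of_eq h.symm)
    rw [Finset.inter_eq_right] at this
    exact this
  · intro h
    rw [Finset.inter_eq_right.mpr h]

-- ===== VERDICT (by name: the statement is the Claim_ definition above) =====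
theorem is_rectangle_valid_spec : Claim_equal_is_rectangle_valid := by
  intro pos1 pos2 vt _ hnd
  unfold Spec_is_rectangle_valid
  have eA : is_rectangle_valid pos1 pos2 vt =
      (if pvEdgeXLoop vt (min pos1.2 pos2.2) (max pos1.2 pos2.2) (max pos1.1 pos2.1) (min pos1.1 pos2.1) then
        pvEdgeYLoop vt (min pos1.1 pos2.1) (max pos1.1 pos2.1) (max pos1.2 pos2.2) (min pos1.2 pos2.2)
      else false) := rfl
  have eB : is_rectangle_valid_alt pos1 pos2 vt =
      ((vt.countP (fun t =>
          decide (min pos1.1 pos2.1 ≤ t.1 ∧ t.1 ≤ max pos1.1 pos2.1 ∧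
            min pos1.2 pos2.2 ≤ t.2 ∧ t.2 ≤ max pos1.2 pos2.2 ∧
            (t.1 = min pos1.1 pos2.1 ∨ t.1 = max pos1.1 pos2.1 ∨
              t.2 = min pos1.2 pos2.2 ∨ t.2 = max pos1.2 pos2.2))) : Int) ==
        (if min pos1.1 pos2.1 = max pos1.1 pos2.1 ∨ min pos1.2 pos2.2 = max pos1.2 pos2.2 then
          (max pos1.1 pos2.1 - min pos1.1 pos2.1 + 1) * (max pos1.2 pos2.2 - min pos1.2 pos2.2 + 1)
        else 2 * (max pos1.1 pos2.1 - min pos1.1 pos2.1) + 2 * (max pos1.2 pos2.2 - min pos1.2 pos2.2))) := rfl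
  rw [eA, eB, Bool.eq_iff_iff,
    portA_iff_subset _ _ _ _ min_le_max min_le_max vt,
    portB_iff_subset _ _ _ _ min_le_max min_le_max vt hnd]
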